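-- pv_equiv track=rewrite | github.com/littlebtc/ptt-lol-boxes | go.py | bar_chart
-- ===== SOURCE A (Python) =====
-- def bar_chart(i):
--     '''
--     Given a int from 0 to 48, output a 6 full-width characters
--     that reprecents the value.
--     '''
--     i = int(i)
--     if i < 0 or i > 48:
--         return ''
--     result = ''
--     while i >= 8:
--         result += u'\u2588'
--         i -= 8
--     graphs = ['', u'\u258F', u'\u258E', u'\u258D',
--               u'\u258C', u'\u258B', u'\u258A', u'\u2589']
--     result += graphs[i]
--     return result + '  ' * (6 - len(result))
-- ===== SOURCE B (Python) =====
-- def bar_chart(i):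
--     '''Render each of the 6 cells independently: cell j shows level min(max(i-8*j,0),8).'''
--     i = int(i)
--     if i < 0 or i > 48:
--         return ''
--     cells = ['  ', u'\u258F', u'\u258E', u'\u258D',
--              u'\u258C', u'\u258B', u'\u258A', u'\u2589', u'\u2588']
--     return ''.join(cells[min(max(i - 8 * j, 0), 8)] for j in range(6))
-- ===== Notes on version B (the rewrite author's own statement) =====
-- stated objective: alternative
-- what changed: Instead of a subtraction loop that appends full blocks and then pads by length, B renders every output cell independently from a single level table (clamping that cell's share of the value) and joins the cells, eliminating the padding arithmetic entirely.
import Mathlib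
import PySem

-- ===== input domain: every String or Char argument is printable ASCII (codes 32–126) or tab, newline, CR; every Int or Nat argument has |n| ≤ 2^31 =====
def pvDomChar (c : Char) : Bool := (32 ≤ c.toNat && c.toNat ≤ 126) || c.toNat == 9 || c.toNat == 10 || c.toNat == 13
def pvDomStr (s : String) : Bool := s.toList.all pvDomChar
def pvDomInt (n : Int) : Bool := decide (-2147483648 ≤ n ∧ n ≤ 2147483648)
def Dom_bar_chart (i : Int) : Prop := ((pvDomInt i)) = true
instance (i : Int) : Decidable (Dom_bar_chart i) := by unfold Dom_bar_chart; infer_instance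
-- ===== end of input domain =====

-- B renders each of the 6 cells independently from a 9-entry level table and joins them,
-- replacing A's subtraction loop and length-based padding (alternative decomposition).

-- ===== PORT A =====
-- Python's '  ' * n (string repetition; empty for n ≤ 0) — exact
def pyStrMul (s : String) (n : Int) : String :=
  String.join (List.replicate n.toNat s)

-- the while loop: while i >= 8: result += '█'; i -= 8   (returns final (result, i))
def barLoop (result : String) (i : Int) : String × Int :=
  if 8 ≤ i then barLoop (result ++ "█") (i - 8) else (result, i)
termination_by i.toNat
decreasing_by omega

def bar_chart (i : Int) : String :=
  if i < 0 ∨ i > 48 then "" else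
  let p := barLoop "" i
  let graphs : List String := ["", "▏", "▎", "▍", "▌", "▋", "▊", "▉"]
  -- graphs[p.2]: in-range here (0 ≤ p.2 < 8), ported with pyGet? (none would mean IndexError)
  let result := p.1 ++ ((PySem.List.pyGet? graphs p.2).getD "")
  result ++ pyStrMul "  " (6 - (result.length : Int))

-- ===== PORT B =====
def bar_chart_alt (i : Int) : String :=
  if i < 0 ∨ i > 48 then "" else
  let cells : List String := ["  ", "▏", "▎", "▍", "▌", "▋", "▊", "▉", "█"]
  String.join ((List.range 6).map fun j =>
    (PySem.List.pyGet? cells (min (max (i - 8 * (j : Int)) 0) 8)).getD "")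

-- ===== PRECONDITION & SPEC =====
def Spec_bar_chart (i : Int) (out : String) : Prop := out = bar_chart_alt i
instance (i : Int) (out : String) : Decidable (Spec_bar_chart i out) := by unfold Spec_bar_chart; infer_instance

-- ===== CLAIM (what is proved, stated in full; the proofs are below) =====
def Claim_equal_bar_chart : Prop := ∀ (i : Int), Dom_bar_chart i → Spec_bar_chart i (bar_chart i)

-- ===== LEMMAS AND PROOFS =====
theorem barLoop_lt (result : String) (i : Int) (h : i < 8) :
    barLoop result i = (result, i) := by
  rw [barLoop]; simp [not_le.mpr h]

theorem barLoop_ge (result : String) (i : Int) (h : 8 ≤ i) :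
    barLoop result i = barLoop (result ++ "█") (i - 8) := by
  rw [barLoop]; simp [h]

-- ===== VERDICT (by name: the statement is the Claim_ definition above) =====
set_option maxHeartbeats 4000000 in
theorem bar_chart_spec : Claim_equal_bar_chart := by
  intro i _
  show bar_chart i = bar_chart_alt i
  by_cases h : i < 0 ∨ i > 48
  · simp [bar_chart, bar_chart_alt, h]
  · push Not at h
    obtain ⟨h0, h48⟩ := h
    interval_cases i <;>
      simp [bar_chart, bar_chart_alt, barLoop_ge, barLoop_lt,
        PySem.List.pyGet?, PySem.List.pyIdx?, pyStrMul, List.range_succ] <;> rfl
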